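-- pv_equiv track=rewrite | github.com/ArcheronTechnologies/haloplatform | src/halo/scripts/fetch_companies.py | generate_orgnrs_in_range
-- ===== SOURCE A (Python) =====
-- def luhn_checksum(number_str: str) -> int:
--     """Calculate the Luhn checksum digit for a 9-digit string."""
--     digits = [int(d) for d in number_str]
--
--     # Double every second digit from right (positions 1, 3, 5, 7)
--     for i in range(len(digits) - 1, -1, -2):
--         digits[i] *= 2
--         if digits[i] > 9:
--             digits[i] -= 9
--
--     total = sum(digits)
--     return (10 - (total % 10)) % 10
--
-- def generate_orgnrs_in_range(start: int, end: int, prefix: str = "5560") -> list[str]: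
--     """Generate valid org numbers in a range using Luhn validation."""
--     valid = []
--
--     for i in range(start, end):
--         # Build 9-digit base: prefix (4) + running (5)
--         running = str(i).zfill(5)
--         base_9 = prefix + running  # 9 digits
--
--         # Calculate checksum on these 9 digits
--         checksum = luhn_checksum(base_9)
--         orgnr = base_9 + str(checksum)
--
--         valid.append(orgnr)
--
--     return valid
-- ===== SOURCE B (Python) =====
-- def _double(d):
--     return 2 * d - 9 if d >= 5 else 2 * d
--
-- def generate_orgnrs_in_range(start: int, end: int, prefix: str = "5560") -> list[str]:
--     """Check digit computed arithmetically from i by divmod (no digit list, no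
--     string scan of the base); the prefix's contribution to the Luhn sum is
--     computed once before the loop, as a pair (even-offset, odd-offset)."""
--     if start >= end:
--         return []
--     pe = po = 0
--     for j, ch in enumerate(reversed(prefix)):
--         d = int(ch)
--         if j % 2 == 0:
--             pe += _double(d)
--             po += d
--         else:
--             pe += d
--             po += _double(d)
--     out = []
--     for i in range(start, end):
--         s = str(i).zfill(5)
--         L = len(s)
--         n, t = i, 0
--         for k in range(L):
--             n, d = divmod(n, 10)
--             t += _double(d) if k % 2 == 0 else d
--         t += pe if L % 2 == 0 else po
--         out.append(prefix + s + str((10 - t % 10) % 10))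
--     return out
-- ===== Notes on version B (the rewrite author's own statement) =====
-- stated objective: alternative
-- what changed: B never runs A's per-item string-to-list Luhn pass (build an int list from the 9-char base, mutate every second entry, sum): the prefix's contribution to the Luhn sum is hoisted out of the loop and computed once as an even/odd-offset pair, and each item's contribution is extracted arithmetically from the integer i itself by repeated divmod, so per item only the running digits are processed and no digit list is built.
import Mathlib
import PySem

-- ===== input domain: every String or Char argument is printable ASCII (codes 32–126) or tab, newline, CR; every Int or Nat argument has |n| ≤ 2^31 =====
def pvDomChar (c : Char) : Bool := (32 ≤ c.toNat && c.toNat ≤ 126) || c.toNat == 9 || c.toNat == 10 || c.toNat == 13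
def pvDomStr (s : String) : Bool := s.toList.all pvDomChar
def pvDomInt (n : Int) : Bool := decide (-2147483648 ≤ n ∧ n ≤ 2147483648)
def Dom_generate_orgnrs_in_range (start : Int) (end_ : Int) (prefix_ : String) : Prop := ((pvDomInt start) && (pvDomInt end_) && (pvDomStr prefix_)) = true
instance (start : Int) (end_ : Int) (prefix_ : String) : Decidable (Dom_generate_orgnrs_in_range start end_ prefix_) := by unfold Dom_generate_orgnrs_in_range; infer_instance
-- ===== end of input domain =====

-- B drops A's per-item string-scanning Luhn helper: the prefix's Luhn contribution is
-- computed once before the loop (even/odd-offset pair) and each item's contribution is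
-- extracted arithmetically from i by divmod (objective: alternative algorithm).

-- ===== PORT A =====
-- int(d) on a single char ported as code - 48: exact for '0'..'9'; Pre_ excludes other
-- chars (Python raises ValueError there).
def luhn_checksum (number_str : String) : Int :=
  let digits : List Int := number_str.toList.map (fun c => ((c.toNat : Int) - 48))
  let digits := (PySem.List.pyRange ((digits.length : Int) - 1) (-1) (-2)).foldl
    (fun ds i =>
      let v := ds.getD i.toNat 0 * 2
      ds.set i.toNat (if v > 9 then v - 9 else v)) digits
  let total := digits.sum
  PySem.Int.mod (10 - PySem.Int.mod total 10) 10

def generate_orgnrs_in_range (start : Int) (end_ : Int) (prefix_ : String) : List String :=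
  (PySem.List.pyRange start end_ 1).foldl (fun valid i =>
    let running := PySem.Str.zfill (PySem.Int.toStr i) 5
    let base_9 := prefix_ ++ running
    let checksum := luhn_checksum base_9
    let orgnr := base_9 ++ PySem.Int.toStr checksum
    valid ++ [orgnr]) []

-- ===== PORT B =====
def pvDouble (d : Int) : Int := if d ≥ 5 then 2 * d - 9 else 2 * d

-- int(ch) ported as code - 48 as in port A; divmod(n, 10) is PySem.Int.floordiv/mod
-- (divisor 10 ≠ 0, so Python's divmod always returns here).
def generate_orgnrs_in_range_alt (start : Int) (end_ : Int) (prefix_ : String) : List String :=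
  if start ≥ end_ then []
  else
  let pepo := (PySem.List.enumerate prefix_.toList.reverse 0).foldl
    (fun (pepo : Int × Int) (p : Int × Char) =>
      let d : Int := ((p.2.toNat : Int) - 48)
      if PySem.Int.mod p.1 2 == 0 then (pepo.1 + pvDouble d, pepo.2 + d)
      else (pepo.1 + d, pepo.2 + pvDouble d)) (0, 0)
  (PySem.List.pyRange start end_ 1).foldl (fun out i =>
    let s := PySem.Str.zfill (PySem.Int.toStr i) 5
    let L := PySem.Str.len s
    let nt := (PySem.List.pyRange 0 L 1).foldl
      (fun (nt : Int × Int) (k : Int) =>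
        let d := PySem.Int.mod nt.1 10
        (PySem.Int.floordiv nt.1 10,
         nt.2 + if PySem.Int.mod k 2 == 0 then pvDouble d else d)) (i, 0)
    let t := nt.2 + (if PySem.Int.mod L 2 == 0 then pepo.1 else pepo.2)
    out ++ [(prefix_ ++ s) ++ PySem.Int.toStr (PySem.Int.mod (10 - PySem.Int.mod t 10) 10)]) []

-- ===== PRECONDITION & SPEC =====
-- Pre_ excludes exactly the inputs on which A raises ValueError from int(d): a nonempty
-- range together with a prefix containing a non-digit character, or a nonempty range
-- starting below 0 (str(i) then contains '-'); A returns on every other input.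
def Pre_generate_orgnrs_in_range (start : Int) (end_ : Int) (prefix_ : String) : Prop :=
  start < end_ → (0 ≤ start ∧ prefix_.toList.all (fun c => decide ('0' ≤ c ∧ c ≤ '9')) = true)
instance (start : Int) (end_ : Int) (prefix_ : String) : Decidable (Pre_generate_orgnrs_in_range start end_ prefix_) := by unfold Pre_generate_orgnrs_in_range; infer_instance

def pvWitness_generate_orgnrs_in_range : Int × Int × String := (7, 10, "5560")

def Spec_generate_orgnrs_in_range (start : Int) (end_ : Int) (prefix_ : String) (out : List String) : Prop := out = generate_orgnrs_in_range_alt start end_ prefix_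
instance (start : Int) (end_ : Int) (prefix_ : String) (out : List String) : Decidable (Spec_generate_orgnrs_in_range start end_ prefix_ out) := by unfold Spec_generate_orgnrs_in_range; infer_instance

-- ===== CLAIM (what is proved, stated in full; the proofs are below) =====
def Claim_equal_generate_orgnrs_in_range : Prop := ∀ (start : Int) (end_ : Int) (prefix_ : String), Dom_generate_orgnrs_in_range start end_ prefix_ → Pre_generate_orgnrs_in_range start end_ prefix_ → Spec_generate_orgnrs_in_range start end_ prefix_ (generate_orgnrs_in_range start end_ prefix_)

-- ===== LEMMAS AND PROOFS =====

-- the Luhn sum of a reversed digit list: double every even-position (from the right) digit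
def pvLuhnRev : List Int → Bool → Int
  | [], _ => 0
  | d :: r, dbl => (if dbl then (if d * 2 > 9 then d * 2 - 9 else d * 2) else d) + pvLuhnRev r (!dbl)

theorem pv_foldl_append_map {α β : Type} (f : α → β) :
    ∀ (l : List α) (acc : List β), l.foldl (fun v i => v ++ [f i]) acc = acc ++ l.map f := by
  intro l
  induction l with
  | nil => simp
  | cons x xs ih => intro acc; simp [List.foldl, ih]

theorem pv_pyRange_neg2_cons (a : Int) (ha : 0 ≤ a) :
    PySem.List.pyRange a (-1) (-2) = a :: PySem.List.pyRange (a - 2) (-1) (-2) := by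
  simp only [PySem.List.pyRange]
  norm_num
  rw [if_pos (by omega : (-1:Int) < a)]
  have hc : ((a + 1 + 2 - 1) / 2).toNat
      = (if 2 < 1 + a then ((a - 2 + 1 + 2 - 1) / 2).toNat else 0) + 1 := by
    split_ifs <;> omega
  rw [hc, List.range_succ_eq_map, List.map_cons, List.map_map]
  congr 1
  · norm_num
  · apply List.map_congr_left; intro k _; simp [Function.comp]; omega

theorem pv_mem_pyRange_neg2 (a x : Int) (hx : x ∈ PySem.List.pyRange a (-1) (-2)) :
    0 ≤ x ∧ x ≤ a := by
  simp only [PySem.List.pyRange] at hx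
  norm_num at hx
  obtain ⟨k, hk, rfl⟩ := hx
  split_ifs at hk <;> omega

theorem pv_foldl_set_append (R : List Int) :
    ∀ (xs ys : List Int), (∀ i ∈ R, 0 ≤ i ∧ i < (xs.length : Int)) →
    R.foldl (fun ds i =>
      ds.set i.toNat (if ds.getD i.toNat 0 * 2 > 9 then ds.getD i.toNat 0 * 2 - 9 else ds.getD i.toNat 0 * 2)) (xs ++ ys)
    = (R.foldl (fun ds i =>
      ds.set i.toNat (if ds.getD i.toNat 0 * 2 > 9 then ds.getD i.toNat 0 * 2 - 9 else ds.getD i.toNat 0 * 2)) xs) ++ ys := by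
  induction R with
  | nil => intro xs ys _; rfl
  | cons j R ih =>
    intro xs ys h
    have hj := h j (List.mem_cons_self ..)
    have hjn : j.toNat < xs.length := by omega
    simp only [List.foldl_cons]
    rw [List.getD_append _ _ _ _ hjn, List.set_append, if_pos hjn]
    exact ih _ ys (by intro i hi; have := h i (List.mem_cons_of_mem _ hi); simpa using this)

-- A's mutate-then-sum loop computes the Luhn sum of the reversed digits
theorem pv_A_total : ∀ (r : List Int),
    ((PySem.List.pyRange ((r.reverse.length : Int) - 1) (-1) (-2)).foldl
      (fun ds i =>
        ds.set i.toNat (if ds.getD i.toNat 0 * 2 > 9 then ds.getD i.toNat 0 * 2 - 9 else ds.getD i.toNat 0 * 2)) r.reverse).sum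
    = pvLuhnRev r true
  | [] => by decide
  | [d] => by
      simp only [List.reverse_singleton, List.length_singleton]
      norm_num
      rw [show PySem.List.pyRange 0 (-1) (-2) = [0] from by decide]
      simp [pvLuhnRev]
  | b :: a :: r' => by
      have ih := pv_A_total r'
      have hrev : (b :: a :: r').reverse = (r'.reverse ++ [a]) ++ [b] := by simp
      rw [hrev]
      have hlen : ((((r'.reverse ++ [a]) ++ [b]).length : Int) - 1) = ((r'.length : Int) + 1) := by
        simp; omega
      rw [hlen, pv_pyRange_neg2_cons _ (by omega), List.foldl_cons]
      have hx : ((r'.length : Int) + 1).toNat = (r'.reverse ++ [a]).length := by simp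
      simp only [hx]
      rw [List.getD_eq_getElem?_getD, List.getElem?_concat_length, Option.getD_some,
        List.set_append, if_neg (by omega)]
      simp only [Nat.sub_self, List.set_cons_zero]
      rw [List.append_assoc]
      rw [pv_foldl_set_append _ r'.reverse _ ?hb]
      case hb =>
        intro i hi
        have := pv_mem_pyRange_neg2 _ _ hi
        simp only [List.length_reverse]
        omega
      rw [List.sum_append]
      have ih' : (List.foldl
          (fun ds i =>
            ds.set i.toNat (if ds.getD i.toNat 0 * 2 > 9 then ds.getD i.toNat 0 * 2 - 9 else ds.getD i.toNat 0 * 2))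
          r'.reverse (PySem.List.pyRange ((r'.length : Int) + 1 - 2) (-1) (-2))).sum = pvLuhnRev r' true := by
        have h2 : ((r'.length : Int) + 1 - 2) = ((r'.reverse.length : Int) - 1) := by simp; omega
        rw [h2]; exact ih
      rw [ih']
      simp [pvLuhnRev]
      ring

theorem pv_parity (k : Int) : (PySem.Int.mod (k + 1) 2 == 0) = !(PySem.Int.mod k 2 == 0) := by
  rw [PySem.Int.mod_eq_emod_of_pos (by norm_num : (0:Int) < 2),
    PySem.Int.mod_eq_emod_of_pos (by norm_num : (0:Int) < 2)]
  rcases Int.emod_two_eq (k + 1) with h | h <;> rcases Int.emod_two_eq k with h2 | h2 <;>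
    simp [h, h2] <;> omega

-- B's doubling rule is A's, for every integer
theorem pv_double_eq (d : Int) : pvDouble d = if d * 2 > 9 then d * 2 - 9 else d * 2 := by
  unfold pvDouble; split_ifs <;> omega

-- splitting a Luhn sum at an append: the right part starts at parity |x|
theorem pv_luhnRev_append : ∀ (x y : List Int) (dbl : Bool),
    pvLuhnRev (x ++ y) dbl
      = pvLuhnRev x dbl + pvLuhnRev y (if x.length % 2 = 0 then dbl else !dbl) := by
  intro x
  induction x with
  | nil => simp [pvLuhnRev]
  | cons a x ih =>
    intro y dbl
    simp only [List.cons_append, pvLuhnRev, ih, List.length_cons]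
    rcases Nat.mod_two_eq_zero_or_one x.length with h | h <;>
      simp [h, Nat.add_mod, Bool.not_not] <;> ring

-- B's prefix fold computes the pair (Luhn sum at even offset, Luhn sum at odd offset)
theorem pv_prefix_fold : ∀ (l : List Char) (k : Int) (acc : Int × Int),
    (PySem.List.enumerate l k).foldl
      (fun (pepo : Int × Int) (p : Int × Char) =>
        let d : Int := ((p.2.toNat : Int) - 48)
        if PySem.Int.mod p.1 2 == 0 then (pepo.1 + pvDouble d, pepo.2 + d)
        else (pepo.1 + d, pepo.2 + pvDouble d)) acc
    = (acc.1 + pvLuhnRev (l.map (fun c => ((c.toNat : Int) - 48))) (PySem.Int.mod k 2 == 0),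
       acc.2 + pvLuhnRev (l.map (fun c => ((c.toNat : Int) - 48))) (!(PySem.Int.mod k 2 == 0))) := by
  intro l
  induction l with
  | nil => intro k acc; simp [PySem.List.enumerate_nil, pvLuhnRev]
  | cons c l ih =>
    intro k acc
    rw [PySem.List.enumerate_cons, List.foldl_cons, ih, pv_parity]
    cases hk : (PySem.Int.mod k 2 == 0) <;>
      simp only [Bool.not_false, Bool.not_true, List.map_cons, pvLuhnRev, if_true, if_false,
        Bool.false_eq_true, pv_double_eq, Prod.ext_iff] <;>
      constructor <;> ring

-- little-endian digits of m, with [0] for 0 (the shape str() prints)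
def pvD (m : Nat) : List Nat :=
  if h : m / 10 = 0 then [m % 10]
  else m % 10 :: pvD (m / 10)
decreasing_by
  exact Nat.div_lt_self (by omega) (by norm_num)

theorem pv_pvD_ne_nil (m : Nat) : pvD m ≠ [] := by
  rw [pvD]; split <;> simp

theorem pv_pvD_lt (m : Nat) : ∀ d ∈ pvD m, d < 10 := by
  induction m using Nat.strong_induction_on with
  | _ m ih =>
    rw [pvD]
    split
    · intro d hd; simp only [List.mem_singleton] at hd; omega
    · rename_i h
      intro d hd
      rcases List.mem_cons.1 hd with rfl | hd
      · omega
      · exact ih (m / 10) (Nat.div_lt_self (by omega) (by norm_num)) d hd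

-- the first N digits of m, as Ints, little-endian (what B's divmod loop reads)
def pvIntDigits : Nat → Nat → List Int
  | _, 0 => []
  | m, f + 1 => ((m % 10 : Nat) : Int) :: pvIntDigits (m / 10) f

theorem pv_intDigits_zero : ∀ f, pvIntDigits 0 f = List.replicate f 0 := by
  intro f
  induction f with
  | zero => rfl
  | succ f ih => simp [pvIntDigits, ih, List.replicate_succ]

theorem pv_intDigits_length : ∀ (f m : Nat), (pvIntDigits m f).length = f := by
  intro f
  induction f with
  | zero => intro m; rfl
  | succ f ih => intro m; simp [pvIntDigits, ih]

theorem pv_intDigits_eq_pvD : ∀ (f m : Nat), (pvD m).length ≤ f →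
    pvIntDigits m f = (pvD m).map (fun d : Nat => (d : Int)) ++ List.replicate (f - (pvD m).length) 0 := by
  intro f
  induction f with
  | zero =>
    intro m h
    have := pv_pvD_ne_nil m
    cases hm : pvD m with
    | nil => exact absurd hm this
    | cons a l => rw [hm] at h; simp at h
  | succ f ih =>
    intro m h
    by_cases h10 : m / 10 = 0
    · rw [pvD, dif_pos h10]
      simp only [pvIntDigits, h10, pv_intDigits_zero]
      simp
    · rw [pvD, dif_neg h10] at h ⊢
      simp only [List.length_cons] at h
      simp only [pvIntDigits, List.map_cons, List.cons_append, List.length_cons]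
      rw [ih (m / 10) (by omega),
        show f + 1 - ((pvD (m / 10)).length + 1) = f - (pvD (m / 10)).length from by omega]

-- Nat.toDigitsCore writes exactly the digits pvD, big-endian, in front of ds
theorem pv_toDigitsCore_eq : ∀ (f m : Nat) (ds : List Char), m < f →
    Nat.toDigitsCore 10 f m ds = ((pvD m).map Nat.digitChar).reverse ++ ds := by
  intro f
  induction f with
  | zero => intro m ds h; omega
  | succ f ih =>
    intro m ds h
    rw [pvD]
    by_cases h10 : m / 10 = 0
    · simp [Nat.toDigitsCore, h10]
    · have hm0 : m ≠ 0 := by intro e; subst e; simp at h10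
      have hlt : m / 10 < f :=
        lt_of_lt_of_le (Nat.div_lt_self (Nat.pos_of_ne_zero hm0) (by norm_num)) (by omega)
      simp only [Nat.toDigitsCore, h10, if_neg, dif_neg, not_false_iff]
      rw [ih (m / 10) _ hlt]
      simp [List.append_assoc]

theorem pv_toChars_eq (m : Nat) :
    PySem.Int.toChars (m : Int) = ((pvD m).map Nat.digitChar).reverse := by
  simp only [PySem.Int.toChars, if_neg (by omega : ¬ ((m : Int) < 0)), Int.toNat_natCast]
  rw [Nat.toDigits, pv_toDigitsCore_eq (m + 1) m [] (by omega)]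
  simp

theorem pv_digitChar_not_sign (d : Nat) (h : d < 10) :
    ¬ (Nat.digitChar d = '+' ∨ Nat.digitChar d = '-') := by
  interval_cases d <;> decide

theorem pv_zfill_toChars (m : Nat) :
    PySem.Chars.zfill (PySem.Int.toChars (m : Int)) 5
      = List.replicate (5 - (PySem.Int.toChars (m : Int)).length) '0'
          ++ PySem.Int.toChars (m : Int) := by
  cases hcs : PySem.Int.toChars (m : Int) with
  | nil =>
    rw [pv_toChars_eq] at hcs
    exact absurd (by simpa using hcs) (pv_pvD_ne_nil m)
  | cons c rest =>
    have hcmem : c ∈ PySem.Int.toChars (m : Int) := by rw [hcs]; exact List.mem_cons_self ..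
    rw [pv_toChars_eq] at hcmem
    rcases List.mem_map.1 (List.mem_reverse.1 hcmem) with ⟨d, hd, he⟩
    have hsign : ¬ (c = '+' ∨ c = '-') := he ▸ pv_digitChar_not_sign d (pv_pvD_lt m d hd)
    unfold PySem.Chars.zfill
    by_cases h5 : (5 : Int) ≤ ((c :: rest).length : Int)
    · rw [if_pos h5]
      have h0 : 5 - (c :: rest).length = 0 := by
        simp only [List.length_cons] at h5 ⊢; omega
      rw [h0, List.replicate_zero, List.nil_append]
    · rw [if_neg h5]
      split
      · rename_i c1 rest1 heq
        injection heq with h1 h2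
        subst h1; subst h2
        rw [if_neg hsign]
        rfl
      · rename_i heq
        exact absurd heq (by simp)

-- the char list B's per-item arithmetic mirrors: digit values of reversed zfill(str(m), 5)
theorem pv_S_eq (m : Nat) :
    ((PySem.Chars.zfill (PySem.Int.toChars (m : Int)) 5).reverse).map
        (fun c => ((c.toNat : Int) - 48))
      = pvIntDigits m (PySem.Chars.zfill (PySem.Int.toChars (m : Int)) 5).length := by
  rw [pv_zfill_toChars, pv_toChars_eq]
  have hlen : (List.replicate (5 - ((pvD m).map Nat.digitChar).reverse.length) '0'
      ++ ((pvD m).map Nat.digitChar).reverse).length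
      = (5 - (pvD m).length) + (pvD m).length := by
    simp
  rw [hlen, pv_intDigits_eq_pvD ((5 - (pvD m).length) + (pvD m).length) m (by omega)]
  have hsub : (5 - (pvD m).length) + (pvD m).length - (pvD m).length = 5 - (pvD m).length := by
    omega
  rw [hsub]
  rw [List.reverse_append, List.reverse_reverse, List.reverse_replicate, List.map_append,
    List.map_map]
  congr 1
  · apply List.map_congr_left
    intro d hd
    have := pv_pvD_lt m d hd
    interval_cases d <;> decide
  · simp [List.map_replicate]

-- B's divmod loop over range(L) computes the Luhn sum of the first L digits of m
theorem pv_run : ∀ (f : Nat) (k : Int) (m : Nat) (t : Int),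
    (PySem.List.pyRange k (k + (f : Int)) 1).foldl
      (fun (nt : Int × Int) (k : Int) =>
        (PySem.Int.floordiv nt.1 10,
         nt.2 + if PySem.Int.mod k 2 == 0 then pvDouble (PySem.Int.mod nt.1 10)
                else PySem.Int.mod nt.1 10)) ((m : Int), t)
    = (((m / 10 ^ f : Nat) : Int), t + pvLuhnRev (pvIntDigits m f) (PySem.Int.mod k 2 == 0)) := by
  intro f
  induction f with
  | zero =>
    intro k m t
    rw [show k + ((0 : Nat) : Int) = k from by simp]
    rw [show PySem.List.pyRange k k 1 = [] from by
      simp [PySem.List.pyRange]]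
    simp [pvIntDigits, pvLuhnRev]
  | succ f ih =>
    intro k m t
    rw [PySem.List.pyRange_one_cons (by push_cast; omega), List.foldl_cons]
    have hacc : (PySem.Int.floordiv (((m : Int), t)).1 10,
         (((m : Int), t)).2 + if PySem.Int.mod k 2 == 0 then pvDouble (PySem.Int.mod (((m : Int), t)).1 10)
                else PySem.Int.mod (((m : Int), t)).1 10)
        = (((m / 10 : Nat) : Int),
           t + if PySem.Int.mod k 2 == 0 then pvDouble ((m % 10 : Nat) : Int)
               else ((m % 10 : Nat) : Int)) := by
      show ((PySem.Int.floordiv ((m : Int)) 10 : Int),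
          t + if PySem.Int.mod k 2 == 0 then pvDouble (PySem.Int.mod ((m : Int)) 10)
              else PySem.Int.mod ((m : Int)) 10) = _
      rw [show (10 : Int) = ((10 : Nat) : Int) from by norm_num,
        PySem.Int.mod_natCast m 10, PySem.Int.floordiv_natCast m 10]
    rw [hacc]
    rw [show k + ((f + 1 : Nat) : Int) = (k + 1) + ((f : Nat) : Int) from by push_cast; ring]
    rw [ih (k + 1) (m / 10)]
    simp only [pvIntDigits, pvLuhnRev, pv_parity, Prod.mk.injEq]
    constructor
    · congr 1
      rw [Nat.div_div_eq_div_mul, pow_succ]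
      ring_nf
    · cases hk : (PySem.Int.mod k 2 == 0) <;>
        simp [pv_double_eq] <;> ring

-- per item: A's string checksum equals B's arithmetic total, for i = ↑m
theorem pv_check_eq (prefix_ : String) (m : Nat) :
    luhn_checksum (prefix_ ++ PySem.Str.zfill (PySem.Int.toStr (m : Int)) 5)
      = PySem.Int.mod
          (10 - PySem.Int.mod
            (((PySem.List.pyRange 0 (PySem.Str.len (PySem.Str.zfill (PySem.Int.toStr (m : Int)) 5)) 1).foldl
                (fun (nt : Int × Int) (k : Int) =>
                  (PySem.Int.floordiv nt.1 10,
                   nt.2 + if PySem.Int.mod k 2 == 0 then pvDouble (PySem.Int.mod nt.1 10)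
                          else PySem.Int.mod nt.1 10)) ((m : Int), 0)).2
              + (if PySem.Int.mod (PySem.Str.len (PySem.Str.zfill (PySem.Int.toStr (m : Int)) 5)) 2 == 0
                 then pvLuhnRev (prefix_.toList.reverse.map (fun c => ((c.toNat : Int) - 48))) true
                 else pvLuhnRev (prefix_.toList.reverse.map (fun c => ((c.toNat : Int) - 48))) false))
            10)
          10 := by
  simp only [luhn_checksum]
  have hA := pv_A_total (((prefix_ ++ PySem.Str.zfill (PySem.Int.toStr (m : Int)) 5).toList.map
      (fun c => ((c.toNat : Int) - 48))).reverse)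
  rw [List.reverse_reverse] at hA
  rw [hA]
  have hzlist : (PySem.Str.zfill (PySem.Int.toStr (m : Int)) 5).toList
      = PySem.Chars.zfill (PySem.Int.toChars (m : Int)) 5 := by
    rw [PySem.Str.toList_zfill, PySem.Int.toList_toStr]
  have hL : PySem.Str.len (PySem.Str.zfill (PySem.Int.toStr (m : Int)) 5)
      = ((PySem.Chars.zfill (PySem.Int.toChars (m : Int)) 5).length : Int) := by
    rw [PySem.Str.len_eq, hzlist]
  rw [String.toList_append, ← List.map_reverse, List.reverse_append, List.map_append]
  rw [pv_luhnRev_append]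
  rw [hzlist, pv_S_eq m]
  rw [hL]
  rw [pv_intDigits_length]
  have hrun := pv_run (PySem.Chars.zfill (PySem.Int.toChars (m : Int)) 5).length 0 m 0
  rw [zero_add, show (PySem.Int.mod 0 2 == 0) = true from by decide] at hrun
  rw [hrun]
  rw [show (2 : Int) = ((2 : Nat) : Int) from by norm_num, PySem.Int.mod_natCast]
  rcases Nat.mod_two_eq_zero_or_one (PySem.Chars.zfill (PySem.Int.toChars (m : Int)) 5).length
    with h | h <;> simp [h]

-- ===== VERDICT (by name: the statement is the Claim_ definition above) =====
theorem generate_orgnrs_in_range_spec : Claim_equal_generate_orgnrs_in_range := by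
  intro start end_ prefix_ _ hpre
  unfold Spec_generate_orgnrs_in_range generate_orgnrs_in_range generate_orgnrs_in_range_alt
  by_cases hse : start ≥ end_
  · rw [if_pos hse]
    rw [show PySem.List.pyRange start end_ 1 = [] from by
      simp only [PySem.List.pyRange]
      norm_num
      omega]
    rfl
  rw [if_neg hse]
  simp only []
  rw [pv_prefix_fold prefix_.toList.reverse 0 (0, 0)]
  rw [pv_foldl_append_map, pv_foldl_append_map, List.nil_append, List.nil_append]
  apply List.map_congr_left
  intro i hi
  have hmem := (PySem.List.mem_pyRange_one).1 hi
  obtain ⟨h0, _⟩ := hpre (lt_of_le_of_lt hmem.1 hmem.2)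
  have hi0 : 0 ≤ i := le_trans h0 hmem.1
  lift i to Nat using hi0 with m hm
  rw [pv_check_eq prefix_ m]
  simp only [show (PySem.Int.mod 0 2 == 0) = true from by decide, Bool.not_true, zero_add]
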